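-- pv_equiv track=rewrite | github.com/temawm/interpretedProgrammingLanguages | InterpretedProgramming/secondTaskPython.py | rearrange_digits_and_letters
-- ===== SOURCE A (Python) =====
-- def rearrange_digits_and_letters(string):
--     digits = []
--     letters = []
--
--     # Разделяем цифры и буквы
--     for char in string:
--         if char.isdigit():
--             digits.append(char)
--         elif char.isalpha():
--             letters.append(char)
--
--     # Объединяем цифры и буквы
--     return ''.join(digits) + ''.join(letters)
-- ===== SOURCE B (Python) =====
-- def rearrange_digits_and_letters(string):
--     kept = [c for c in string if c.isdigit() or c.isalpha()]
--     return ''.join(sorted(kept, key=lambda c: 0 if c.isdigit() else 1))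
-- ===== Notes on version B (the rewrite author's own statement) =====
-- stated objective: alternative
-- what changed: Replaces A's one-pass two-bucket partition with a filter of the digit/letter characters followed by a stable sort keyed 0-for-digit/1-for-letter, relying on sort stability to preserve each group's original order.
import Mathlib
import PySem

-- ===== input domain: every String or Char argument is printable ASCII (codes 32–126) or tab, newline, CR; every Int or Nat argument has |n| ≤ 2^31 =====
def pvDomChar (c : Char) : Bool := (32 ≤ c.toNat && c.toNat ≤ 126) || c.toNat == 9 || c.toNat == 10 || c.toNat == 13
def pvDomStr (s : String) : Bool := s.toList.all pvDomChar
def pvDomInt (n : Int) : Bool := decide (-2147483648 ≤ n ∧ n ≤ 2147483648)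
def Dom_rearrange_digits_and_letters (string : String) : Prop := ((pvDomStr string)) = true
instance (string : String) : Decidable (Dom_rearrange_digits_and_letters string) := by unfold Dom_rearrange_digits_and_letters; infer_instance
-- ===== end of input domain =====

-- B filters the digit/letter characters and stable-sorts them with key 0-for-digit/1-for-letter,
-- instead of A's one-pass two-bucket partition; same cost class in practice, different algorithm.


-- ===== PORT A =====
def rearrange_digits_and_letters (string : String) : String :=
  let r := string.toList.foldl
    (fun (acc : List Char × List Char) char =>
      if PySem.Chars.isdigit char then (acc.1 ++ [char], acc.2)
      else if PySem.Chars.isalpha char then (acc.1, acc.2 ++ [char])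
      else acc)
    ([], [])
  -- ''.join(digits) + ''.join(letters) on lists of single characters is concatenation
  String.ofList (r.1 ++ r.2)

-- ===== PORT B =====
def rearrange_digits_and_letters_alt (string : String) : String :=
  let kept := string.toList.filter
    (fun c => PySem.Chars.isdigit c || PySem.Chars.isalpha c)
  String.ofList (PySem.List.sorted kept
    (fun c => if PySem.Chars.isdigit c then (0 : Int) else 1))

-- ===== PRECONDITION & SPEC =====
def Spec_rearrange_digits_and_letters (string : String) (out : String) : Prop := out = rearrange_digits_and_letters_alt string
instance (string : String) (out : String) : Decidable (Spec_rearrange_digits_and_letters string out) := by unfold Spec_rearrange_digits_and_letters; infer_instance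

-- ===== CLAIM (what is proved, stated in full; the proofs are below) =====
def Claim_equal_rearrange_digits_and_letters : Prop := ∀ (string : String), Dom_rearrange_digits_and_letters string → Spec_rearrange_digits_and_letters string (rearrange_digits_and_letters string)

-- ===== LEMMAS AND PROOFS =====

-- inserting a letter (key 1): never strictly before anything, so it goes to the end
lemma insertBy_letter (x : Char) (hx : PySem.Chars.isdigit x = false) (l : List Char) :
    PySem.List.insertBy
      (fun a b => decide ((if PySem.Chars.isdigit a then (0 : Int) else 1) <
                          (if PySem.Chars.isdigit b then (0 : Int) else 1))) x l
      = l ++ [x] := by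
  apply PySem.List.insertBy_of_forall_not_before
  intro y _
  simp [hx]
  split <;> decide

-- inserting a digit (key 0) into digits ++ letters lands between the two groups
lemma insertBy_digit (x : Char) (hx : PySem.Chars.isdigit x = true)
    (d e : List Char) (hd : ∀ c ∈ d, PySem.Chars.isdigit c = true)
    (he : ∀ c ∈ e, PySem.Chars.isdigit c = false) :
    PySem.List.insertBy
      (fun a b => decide ((if PySem.Chars.isdigit a then (0 : Int) else 1) <
                          (if PySem.Chars.isdigit b then (0 : Int) else 1))) x (d ++ e)
      = d ++ x :: e := by
  induction d with
  | nil =>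
    cases e with
    | nil => simp [PySem.List.insertBy]
    | cons y ys =>
      have hy := he y (by simp)
      simp [PySem.List.insertBy, hx, hy]
  | cons y d ih =>
    have hy := hd y (by simp)
    simp only [List.cons_append, PySem.List.insertBy, hx, hy]
    simp only [decide_eq_true_eq]
    rw [if_neg (by norm_num)]
    rw [ih (fun c hc => hd c (by simp [hc]))]

-- the insertion-sort fold over any char list, from a digits ++ letters accumulator
lemma sort_loop (l d e : List Char) (hd : ∀ c ∈ d, PySem.Chars.isdigit c = true)
    (he : ∀ c ∈ e, PySem.Chars.isdigit c = false) :
    l.foldl (fun acc x => PySem.List.insertBy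
      (fun a b => decide ((if PySem.Chars.isdigit a then (0 : Int) else 1) <
                          (if PySem.Chars.isdigit b then (0 : Int) else 1))) x acc) (d ++ e)
      = (d ++ l.filter PySem.Chars.isdigit) ++
        (e ++ l.filter (fun c => !PySem.Chars.isdigit c)) := by
  induction l generalizing d e with
  | nil => simp
  | cons x l ih =>
    by_cases hx : PySem.Chars.isdigit x = true
    · rw [List.foldl_cons, insertBy_digit x hx d e hd he]
      have : d ++ x :: e = (d ++ [x]) ++ e := by simp
      rw [this, ih (d ++ [x]) e
        (by intro c hc; rcases List.mem_append.1 hc with h | h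
            · exact hd c h
            · simp at h; subst h; exact hx) he]
      simp [hx]
    · have hx' : PySem.Chars.isdigit x = false := by simpa using hx
      rw [List.foldl_cons, insertBy_letter x hx' (d ++ e)]
      have : (d ++ e) ++ [x] = d ++ (e ++ [x]) := by simp
      rw [this, ih d (e ++ [x]) hd
        (by intro c hc; rcases List.mem_append.1 hc with h | h
            · exact he c h
            · simp at h; subst h; exact hx')]
      simp [hx']

-- A's partition fold, characterised
lemma a_loop (l : List Char) (acc : List Char × List Char) :
    l.foldl (fun (acc : List Char × List Char) char =>
      if PySem.Chars.isdigit char then (acc.1 ++ [char], acc.2)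
      else if PySem.Chars.isalpha char then (acc.1, acc.2 ++ [char])
      else acc) acc
    = (acc.1 ++ l.filter PySem.Chars.isdigit,
       acc.2 ++ l.filter (fun c => !PySem.Chars.isdigit c && PySem.Chars.isalpha c)) := by
  induction l generalizing acc with
  | nil => simp
  | cons x l ih =>
    by_cases hx : PySem.Chars.isdigit x = true
    · simp [List.foldl_cons, hx, ih]
    · have hx' : PySem.Chars.isdigit x = false := by simpa using hx
      by_cases ha : PySem.Chars.isalpha x = true
      · simp [List.foldl_cons, hx', ha, ih]
      · have ha' : PySem.Chars.isalpha x = false := by simpa using ha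
        simp [List.foldl_cons, hx', ha', ih]

-- ===== VERDICT (by name: the statement is the Claim_ definition above) =====
theorem rearrange_digits_and_letters_spec : Claim_equal_rearrange_digits_and_letters := by
  intro s _
  unfold Spec_rearrange_digits_and_letters
  unfold rearrange_digits_and_letters rearrange_digits_and_letters_alt
  dsimp only
  rw [PySem.List.sorted_eq_foldl_insertBy]
  have hs := sort_loop (s.toList.filter
    (fun c => PySem.Chars.isdigit c || PySem.Chars.isalpha c)) [] [] (by simp) (by simp)
  simp only [List.nil_append] at hs
  rw [hs, a_loop]
  simp only [List.nil_append, List.filter_filter]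
  congr 2
  · exact (List.filter_congr (fun c _ => by cases hd : PySem.Chars.isdigit c <;> simp [hd])).symm
  · exact List.filter_congr (fun c _ => by cases hd : PySem.Chars.isdigit c <;> simp)
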